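-- pv_equiv track=rewrite | github.com/Dennis1122/cognitive | ClassificationUI/mysite/Demo/AttachmentsOrdering.py | orderPages
-- ===== SOURCE A (Python) =====
-- def findOrder(order,result):
--     pagesNumbers = []
--     for eachitem in order:
--         for i in range(0,len(result)):
--             if result[i]!=0:
--                 #print eachitem
--                 if eachitem==result[i][0]:
--                     #print result[i][0]
--                     pagesNumbers.append(result[i][1])
--                     result[i]=0
--
--     #print result
--     result = list(filter(lambda a: a != 0, result))
--
--     for item in result:
--         if item[0]!="TRANSMITTAL":
--             pagesNumbers.append(item[1])
--
--
--     return pagesNumbers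
--
-- def orderPages(lawsuit,res):
--     result = []
--     for i in range(0,len(res)):
--         result.append((res[i],i))
--     if lawsuit=="Subpoena":
--         order = ['SUBPOENA','REQUEST','AUTHORIZATION','LETTER']
--
--     elif lawsuit=="Asbestos Litigation":
--         order = ['COMPLAINT','SUMMONS','NOTICE','ORDER','LETTER','INTERROGATORIES','REQUEST','AFFIDAVIT','JUDGMENT','CERTIFICATE' ]
--
--     elif lawsuit=="Foreclosure Litigation":
--         order = ['COMPLAINT','SUMMONS','NOTICE','ORDER','LETTER','INTERROGATORIES','REQUEST','AFFIDAVIT','JUDGMENT','DISMISSAL','CERTIFICATE' ]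
--
--     elif lawsuit.find("Garnishm")>=0:
--         order = ['WRIT','REQUEST','SUMMONS','COMPLAINT','ORDER','RELEASE','DISMISSAL']
--
--     elif lawsuit=="Insurance Litigation":
--         order = ['COMPLAINT','SUMMONS','NOTICE','ORDER','LETTER','INTERROGATORIES','REQUEST','AFFIDAVIT','JUDGMENT','DISMISSAL','CERTIFICATE' ]
--
--     elif lawsuit=="Levies":
--         order = ['NOTICE','DEMAND']
--
--
--     return findOrder(order,result)
-- ===== SOURCE B (Python) =====
-- def _emit_pages(order, res):
--     # build an index: document type -> its page indices, one pass over res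
--     by_type = {}
--     for i, t in enumerate(res):
--         by_type.setdefault(t, []).append(i)
--     out = []
--     for t in order:
--         out.extend(by_type.get(t, []))
--     for i, t in enumerate(res):
--         if t not in order and t != "TRANSMITTAL":
--             out.append(i)
--     return out
--
-- def orderPages(lawsuit, res):
--     if lawsuit == "Subpoena":
--         order = ['SUBPOENA','REQUEST','AUTHORIZATION','LETTER']
--     elif lawsuit == "Asbestos Litigation":
--         order = ['COMPLAINT','SUMMONS','NOTICE','ORDER','LETTER','INTERROGATORIES','REQUEST','AFFIDAVIT','JUDGMENT','CERTIFICATE']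
--     elif lawsuit == "Foreclosure Litigation":
--         order = ['COMPLAINT','SUMMONS','NOTICE','ORDER','LETTER','INTERROGATORIES','REQUEST','AFFIDAVIT','JUDGMENT','DISMISSAL','CERTIFICATE']
--     elif lawsuit.find("Garnishm") >= 0:
--         order = ['WRIT','REQUEST','SUMMONS','COMPLAINT','ORDER','RELEASE','DISMISSAL']
--     elif lawsuit == "Insurance Litigation":
--         order = ['COMPLAINT','SUMMONS','NOTICE','ORDER','LETTER','INTERROGATORIES','REQUEST','AFFIDAVIT','JUDGMENT','DISMISSAL','CERTIFICATE']
--     elif lawsuit == "Levies":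
--         order = ['NOTICE','DEMAND']
--     return _emit_pages(order, res)
-- ===== Notes on version B (the rewrite author's own statement) =====
-- stated objective: alternative
-- what changed: findOrder's priority-by-pages nested scan with in-place zeroing of matched cells is replaced by one pass building a dict type->page-index-list, an ordered emit over the priority list, and one leftover pass; the lawsuit branch chain is unchanged.
-- outside the precondition, e.g. on orderPages('Unknown Suit', ['NOTICE']): A raises UnboundLocalError, B raises UnboundLocalError
import Mathlib
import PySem

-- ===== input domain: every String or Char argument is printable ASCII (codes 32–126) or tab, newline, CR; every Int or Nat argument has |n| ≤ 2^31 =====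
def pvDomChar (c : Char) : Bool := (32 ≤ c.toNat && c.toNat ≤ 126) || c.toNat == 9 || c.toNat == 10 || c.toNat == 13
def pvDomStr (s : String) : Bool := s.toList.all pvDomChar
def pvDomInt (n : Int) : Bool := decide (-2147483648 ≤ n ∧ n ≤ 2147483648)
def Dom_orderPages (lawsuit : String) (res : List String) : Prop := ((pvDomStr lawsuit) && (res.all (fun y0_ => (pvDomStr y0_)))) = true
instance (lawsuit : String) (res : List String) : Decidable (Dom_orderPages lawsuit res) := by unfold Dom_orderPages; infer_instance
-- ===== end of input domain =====

-- B replaces findOrder's priority×pages repeated scanning with one indexing pass (type -> page list)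
-- followed by an ordered emit; objective: simpler/alternative, same results.

-- ===== PORT A =====
-- inner 'for i in range(len(result)): if result[i]!=0: if eachitem==result[i][0]: append; result[i]=0'
-- (a marked cell result[i]=0 is `none`; mutation is at the scanned index, so a structural pass
--  rebuilding the list computes the same state)
def passA (eachitem : String) : List Int → List (Option (String × Int)) → List Int × List (Option (String × Int))
  | pn, [] => (pn, [])
  | pn, none :: rest =>
      let s := passA eachitem pn rest
      (s.1, none :: s.2)
  | pn, some p :: rest =>
      if eachitem = p.1 then
        let s := passA eachitem (pn ++ [p.2]) rest
        (s.1, none :: s.2)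
      else
        let s := passA eachitem pn rest
        (s.1, some p :: s.2)

def findOrderA (order : List String) (result : List (Option (String × Int))) : List Int :=
  -- for eachitem in order: <inner pass>
  let s := order.foldl (fun s item => passA item s.1 s.2) ([], result)
  -- result = list(filter(lambda a: a != 0, result))
  let result' := s.2.filterMap id
  -- for item in result: if item[0] != "TRANSMITTAL": pagesNumbers.append(item[1])
  result'.foldl (fun pn item => if item.1 ≠ "TRANSMITTAL" then pn ++ [item.2] else pn) s.1

def orderPages (lawsuit : String) (res : List String) : List Int :=
  -- result.append((res[i], i)) over range(len(res))
  let result := (PySem.List.enumerate res).map (fun p => (some (p.2, p.1) : Option (String × Int)))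
  if lawsuit = "Subpoena" then
    findOrderA ["SUBPOENA", "REQUEST", "AUTHORIZATION", "LETTER"] result
  else if lawsuit = "Asbestos Litigation" then
    findOrderA ["COMPLAINT", "SUMMONS", "NOTICE", "ORDER", "LETTER", "INTERROGATORIES", "REQUEST", "AFFIDAVIT", "JUDGMENT", "CERTIFICATE"] result
  else if lawsuit = "Foreclosure Litigation" then
    findOrderA ["COMPLAINT", "SUMMONS", "NOTICE", "ORDER", "LETTER", "INTERROGATORIES", "REQUEST", "AFFIDAVIT", "JUDGMENT", "DISMISSAL", "CERTIFICATE"] result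
  else if 0 ≤ PySem.Str.find lawsuit "Garnishm" then
    findOrderA ["WRIT", "REQUEST", "SUMMONS", "COMPLAINT", "ORDER", "RELEASE", "DISMISSAL"] result
  else if lawsuit = "Insurance Litigation" then
    findOrderA ["COMPLAINT", "SUMMONS", "NOTICE", "ORDER", "LETTER", "INTERROGATORIES", "REQUEST", "AFFIDAVIT", "JUDGMENT", "DISMISSAL", "CERTIFICATE"] result
  else if lawsuit = "Levies" then
    findOrderA ["NOTICE", "DEMAND"] result
  else
    []  -- Python raises UnboundLocalError here ('order' unassigned); excluded by Pre_orderPages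

-- ===== PORT B =====
def emitPagesB (order : List String) (res : List String) : List Int :=
  -- by_type.setdefault(t, []).append(i) over enumerate(res)
  let byType := (PySem.List.enumerate res).foldl
      (fun d p => d.modify p.2 [] (· ++ [p.1])) (PySem.Dict.empty : PySem.Dict String (List Int))
  -- for t in order: out.extend(by_type.get(t, []))
  let out := order.foldl (fun out t => out ++ byType.getD t []) []
  -- for i, t in enumerate(res): if t not in order and t != "TRANSMITTAL": out.append(i)
  (PySem.List.enumerate res).foldl
      (fun out p => if p.2 ∉ order ∧ p.2 ≠ "TRANSMITTAL" then out ++ [p.1] else out) out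

def orderPages_alt (lawsuit : String) (res : List String) : List Int :=
  if lawsuit = "Subpoena" then
    emitPagesB ["SUBPOENA", "REQUEST", "AUTHORIZATION", "LETTER"] res
  else if lawsuit = "Asbestos Litigation" then
    emitPagesB ["COMPLAINT", "SUMMONS", "NOTICE", "ORDER", "LETTER", "INTERROGATORIES", "REQUEST", "AFFIDAVIT", "JUDGMENT", "CERTIFICATE"] res
  else if lawsuit = "Foreclosure Litigation" then
    emitPagesB ["COMPLAINT", "SUMMONS", "NOTICE", "ORDER", "LETTER", "INTERROGATORIES", "REQUEST", "AFFIDAVIT", "JUDGMENT", "DISMISSAL", "CERTIFICATE"] res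
  else if 0 ≤ PySem.Str.find lawsuit "Garnishm" then
    emitPagesB ["WRIT", "REQUEST", "SUMMONS", "COMPLAINT", "ORDER", "RELEASE", "DISMISSAL"] res
  else if lawsuit = "Insurance Litigation" then
    emitPagesB ["COMPLAINT", "SUMMONS", "NOTICE", "ORDER", "LETTER", "INTERROGATORIES", "REQUEST", "AFFIDAVIT", "JUDGMENT", "DISMISSAL", "CERTIFICATE"] res
  else if lawsuit = "Levies" then
    emitPagesB ["NOTICE", "DEMAND"] res
  else
    []  -- same UnboundLocalError in B's Python; excluded by Pre_orderPages

-- ===== PRECONDITION & SPEC =====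
-- Pre_ excludes exactly the lawsuit strings matching no branch, on which both Pythons raise
-- UnboundLocalError ('order' referenced before assignment).
def Pre_orderPages (lawsuit : String) (res : List String) : Prop :=
  lawsuit = "Subpoena" ∨ lawsuit = "Asbestos Litigation" ∨ lawsuit = "Foreclosure Litigation" ∨
  0 ≤ PySem.Str.find lawsuit "Garnishm" ∨ lawsuit = "Insurance Litigation" ∨ lawsuit = "Levies"
instance (lawsuit : String) (res : List String) : Decidable (Pre_orderPages lawsuit res) := by unfold Pre_orderPages; infer_instance

def pvWitness_orderPages : String × List String :=
  ("Levies", ["NOTICE", "DEMAND", "MISC", "NOTICE", "TRANSMITTAL"])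

def Spec_orderPages (lawsuit : String) (res : List String) (out : List Int) : Prop := out = orderPages_alt lawsuit res
instance (lawsuit : String) (res : List String) (out : List Int) : Decidable (Spec_orderPages lawsuit res out) := by unfold Spec_orderPages; infer_instance

-- ===== CLAIM (what is proved, stated in full; the proofs are below) =====
def Claim_equal_orderPages : Prop := ∀ (lawsuit : String) (res : List String), Dom_orderPages lawsuit res → Pre_orderPages lawsuit res → Spec_orderPages lawsuit res (orderPages lawsuit res)

-- ===== LEMMAS AND PROOFS =====

-- common normal form of both programs
def matchesOf (t : String) (r : List (Option (String × Int))) : List Int :=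
  ((r.filterMap id).filter (fun p => decide (t = p.1))).map (·.2)

def markOne (t : String) (r : List (Option (String × Int))) : List (Option (String × Int)) :=
  r.map (fun c => c.bind (fun p => if t = p.1 then none else some p))

def spineOf (order : List String) (res : List String) : List Int :=
  order.flatMap (fun t => ((PySem.List.enumerate res).filter (fun e => decide (t = e.2))).map (·.1))
  ++ ((PySem.List.enumerate res).filter
        (fun e => decide (e.2 ∉ order) && decide (e.2 ≠ "TRANSMITTAL"))).map (·.1)

theorem passA_spec (t : String) (r : List (Option (String × Int))) (pn : List Int) :
    passA t pn r = (pn ++ matchesOf t r, markOne t r) := by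
  induction r generalizing pn with
  | nil => simp [passA, matchesOf, markOne]
  | cons c rest ih =>
    cases c with
    | none => simp [passA, matchesOf, markOne, ih]
    | some p =>
      by_cases h : t = p.1
      · subst h; simp [passA, matchesOf, markOne, ih]
      · simp [passA, h, matchesOf, markOne, ih]

theorem filterMap_markOne (t : String) (r : List (Option (String × Int))) :
    (markOne t r).filterMap id = (r.filterMap id).filter (fun p => !decide (t = p.1)) := by
  induction r with
  | nil => simp [markOne]
  | cons c rest ih =>
    cases c with
    | none => simpa [markOne] using ih
    | some p =>
      by_cases h : t = p.1
      · subst h; simp [markOne]; simpa [markOne] using ih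
      · simp [markOne, h]; simpa [markOne] using ih

theorem matchesOf_markOne {u t : String} (h : u ≠ t) (r : List (Option (String × Int))) :
    matchesOf u (markOne t r) = matchesOf u r := by
  unfold matchesOf
  rw [filterMap_markOne, List.filter_filter]
  congr 1
  apply List.filter_congr
  intro p _
  by_cases hu : u = p.1
  · have ht : ¬ (t = p.1) := fun hh => h (hu.trans hh.symm)
    simp [hu, ht]
  · simp [hu]

def collectA : List String → List (Option (String × Int)) → List Int
  | [], _ => []
  | t :: ts, r => matchesOf t r ++ collectA ts (markOne t r)

theorem foldl_passA (order : List String) (pn : List Int) (r : List (Option (String × Int))) :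
    order.foldl (fun s item => passA item s.1 s.2) (pn, r)
      = (pn ++ collectA order r, order.foldl (fun r t => markOne t r) r) := by
  induction order generalizing pn r with
  | nil => simp [collectA]
  | cons t ts ih =>
    rw [List.foldl_cons, passA_spec, ih]
    simp [collectA, List.append_assoc]

theorem collectA_nodup (order : List String) (h : order.Nodup)
    (r : List (Option (String × Int))) :
    collectA order r = order.flatMap (fun t => matchesOf t r) := by
  induction order generalizing r with
  | nil => simp [collectA]
  | cons t ts ih =>
    simp only [collectA, List.flatMap_cons]
    congr 1
    rw [ih (List.Nodup.of_cons h) (markOne t r)]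
    apply List.flatMap_congr
    intro u hu
    exact matchesOf_markOne (fun e => (List.nodup_cons.mp h).1 (by rw [← e]; exact hu)) r

theorem filterMap_foldl_markOne (order : List String) (r : List (Option (String × Int))) :
    (order.foldl (fun r t => markOne t r) r).filterMap id
      = (r.filterMap id).filter (fun p => decide (p.1 ∉ order)) := by
  induction order generalizing r with
  | nil => simp
  | cons t ts ih =>
    simp only [List.foldl_cons]
    rw [ih, filterMap_markOne, List.filter_filter]
    apply List.filter_congr
    intro p _
    by_cases h1 : p.1 ∈ ts <;> by_cases h2 : t = p.1 <;> simp [h1, h2, eq_comm]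

theorem findOrderA_eq_spine (order : List String) (h : order.Nodup) (res : List String) :
    findOrderA order ((PySem.List.enumerate res).map (fun p => (some (p.2, p.1) : Option (String × Int))))
      = spineOf order res := by
  simp only [findOrderA]
  rw [foldl_passA, filterMap_foldl_markOne]
  rw [PySem.List.foldl_append_ite (p := fun item : String × Int => item.1 ≠ "TRANSMITTAL") (f := fun item => item.2)]
  rw [collectA_nodup order h]
  have hpairs : ((PySem.List.enumerate res).map (fun p => (some (p.2, p.1) : Option (String × Int)))).filterMap id
      = (PySem.List.enumerate res).map (fun p => (p.2, p.1)) := by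
    rw [List.filterMap_map]
    simp
  unfold spineOf
  rw [hpairs]
  congr 1
  · apply List.flatMap_congr
    intro t _
    unfold matchesOf
    rw [hpairs, List.filter_map, List.map_map]
    rfl
  · simp only [List.filter_map, List.map_map, List.filter_filter, Function.comp_def]
    congr 1
    apply List.filter_congr
    intro e _
    simp [Bool.and_comm]

theorem getD_byType (res : List String) (t : String) :
    ((PySem.List.enumerate res).foldl
        (fun d p => d.modify p.2 [] (· ++ [p.1])) (PySem.Dict.empty : PySem.Dict String (List Int))).getD t []
      = (((PySem.List.enumerate res).map (fun p => (p.2, p.1))).filter (fun q => q.1 == t)).map (·.2) := by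
  have hfold : (PySem.List.enumerate res).foldl
        (fun d p => d.modify p.2 [] (· ++ [p.1])) (PySem.Dict.empty : PySem.Dict String (List Int))
      = ((PySem.List.enumerate res).map (fun p => (p.2, p.1))).foldl
        (fun d q => d.modify q.1 [] (· ++ [q.2])) PySem.Dict.empty := by
    rw [List.foldl_map]
  rw [hfold, PySem.Dict.getD_foldl_modify_append]
  simp

theorem emitPagesB_eq_spine (order : List String) (res : List String) :
    emitPagesB order res = spineOf order res := by
  simp only [emitPagesB]
  rw [PySem.List.foldl_append_eq_flatMap, PySem.List.foldl_append_ite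
    (p := fun p : Int × String => p.2 ∉ order ∧ p.2 ≠ "TRANSMITTAL") (f := fun p => p.1)]
  unfold spineOf
  congr 1
  · simp only [List.nil_append]
    apply List.flatMap_congr
    intro t _
    rw [getD_byType, List.filter_map, List.map_map]
    have : ∀ e : Int × String, ((fun q : String × Int => q.1 == t) ∘ (fun p : Int × String => (p.2, p.1))) e
        = decide (t = e.2) := by
      intro e
      by_cases h : t = e.2
      · simp [← h]
      · simp [h, Ne.symm h]
    rw [List.filter_congr (fun e _ => this e)]
    rfl
  · apply congrArg
    apply List.filter_congr
    intro e _
    simp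

-- ===== VERDICT (by name: the statement is the Claim_ definition above) =====
theorem orderPages_spec : Claim_equal_orderPages := by
  intro lawsuit res _ hpre
  unfold Spec_orderPages
  simp only [orderPages, orderPages_alt]
  split_ifs with h1 h2 h3 h4 h5 h6
  · rw [emitPagesB_eq_spine]; exact findOrderA_eq_spine _ (by decide) res
  · rw [emitPagesB_eq_spine]; exact findOrderA_eq_spine _ (by decide) res
  · rw [emitPagesB_eq_spine]; exact findOrderA_eq_spine _ (by decide) res
  · rw [emitPagesB_eq_spine]; exact findOrderA_eq_spine _ (by decide) res
  · rw [emitPagesB_eq_spine]; exact findOrderA_eq_spine _ (by decide) res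
  · rw [emitPagesB_eq_spine]; exact findOrderA_eq_spine _ (by decide) res
  · rcases hpre with h | h | h | h | h | h <;> first
      | exact absurd h h1 | exact absurd h h2 | exact absurd h h3
      | exact absurd h h4 | exact absurd h h5 | exact absurd h h6
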